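-- pv_equiv track=rewrite | github.com/joel10195/coding_test | 프로그래머스/1/82612. 부족한 금액 계산하기/부족한 금액 계산하기.py | solution
-- ===== SOURCE A (Python) =====
-- def solution(price, money, count):
--     result = 0
--     n_price = 0
--
--     for i in range(1, count+1):
--         n_price = price * i
--         result = result + n_price
--
--     if money - result >= 0:
--         return 0
--     else:
--         return -(money - result)
-- ===== SOURCE B (Python) =====
-- def solution(price, money, count):
--     c = max(count, 0)
--     total = price * c * (c + 1) // 2
--     return max(0, total - money)
-- ===== Notes on version B (the rewrite author's own statement) =====
-- stated objective: faster
-- what changed: Replaced the O(count) accumulation loop by the closed-form triangular-number formula price*count*(count+1)//2, then max with 0.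
import Mathlib
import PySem

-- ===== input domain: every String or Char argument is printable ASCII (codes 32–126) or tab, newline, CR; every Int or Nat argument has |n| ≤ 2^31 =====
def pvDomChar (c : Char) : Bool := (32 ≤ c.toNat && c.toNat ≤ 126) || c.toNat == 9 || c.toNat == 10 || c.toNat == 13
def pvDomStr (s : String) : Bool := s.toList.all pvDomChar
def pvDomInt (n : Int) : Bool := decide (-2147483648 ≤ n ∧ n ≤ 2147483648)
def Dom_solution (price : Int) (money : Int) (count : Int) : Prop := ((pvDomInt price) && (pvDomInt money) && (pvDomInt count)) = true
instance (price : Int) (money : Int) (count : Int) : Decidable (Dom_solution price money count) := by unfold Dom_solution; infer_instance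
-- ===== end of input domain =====

-- B replaces A's O(count) accumulation loop by the closed-form triangular sum (objective: faster).

-- ===== PORT A =====
-- loop state: (result, n_price), exactly A's two mutable variables
def solution (price : Int) (money : Int) (count : Int) : Int :=
  let st := (PySem.List.pyRange 1 (count + 1) 1).foldl
      (fun (st : Int × Int) i => (st.1 + price * i, price * i)) (0, 0)
  if money - st.1 ≥ 0 then 0 else -(money - st.1)

-- ===== PORT B =====
def solution_alt (price : Int) (money : Int) (count : Int) : Int :=
  let c := max count 0
  let total := PySem.Int.floordiv (price * c * (c + 1)) 2
  max 0 (total - money)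

-- ===== PRECONDITION & SPEC =====
def Spec_solution (price : Int) (money : Int) (count : Int) (out : Int) : Prop := out = solution_alt price money count
instance (price : Int) (money : Int) (count : Int) (out : Int) : Decidable (Spec_solution price money count out) := by unfold Spec_solution; infer_instance

-- ===== CLAIM (what is proved, stated in full; the proofs are below) =====
def Claim_equal_solution : Prop := ∀ (price : Int) (money : Int) (count : Int), Dom_solution price money count → Spec_solution price money count (solution price money count)

-- ===== LEMMAS AND PROOFS =====
theorem pv_loop_sum (price r0 p0 : Int) (n : ℕ) :
    ((PySem.List.pyRange 1 ((n : Int) + 1) 1).foldl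
      (fun (st : Int × Int) i => (st.1 + price * i, price * i)) (r0, p0)).1
      = r0 + price * (n : Int) * ((n : Int) + 1) / 2 := by
  induction n generalizing r0 p0 with
  | zero => simp [PySem.List.pyRange_one_eq_nil]
  | succ m ih =>
    have h : PySem.List.pyRange 1 ((m : Int) + 1 + 1) 1
        = PySem.List.pyRange 1 ((m : Int) + 1) 1 ++ [(m : Int) + 1] := by
      exact PySem.List.pyRange_one_succ_right (by omega)
    push_cast
    rw [h, List.foldl_append]
    simp only [List.foldl_cons, List.foldl_nil]
    rw [ih]
    have h2 : (2:Int) ∣ (m : Int) * ((m : Int) + 1) := Int.even_mul_succ_self (m:Int) |>.two_dvd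
    obtain ⟨k, hk⟩ := h2
    have hk1 : price * (m : Int) * ((m : Int) + 1) = (price * k) * 2 := by rw [mul_assoc, hk]; ring
    have hk2 : price * ((m : Int) + 1) * ((m : Int) + 1 + 1) = (price * (k + (m:Int) + 1)) * 2 := by
      have : ((m : Int) + 1) * ((m : Int) + 1 + 1) = (m:Int) * ((m:Int)+1) + 2*((m:Int)+1) := by ring
      rw [mul_assoc, this, hk]; ring
    rw [hk1, hk2, Int.mul_ediv_cancel _ (by norm_num), Int.mul_ediv_cancel _ (by norm_num)]
    ring

theorem pv_main (price money count : Int) : solution price money count = solution_alt price money count := by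
  simp only [solution, solution_alt]
  by_cases hc : 0 ≤ count
  · obtain ⟨n, hn⟩ : ∃ n : ℕ, count = (n : Int) := ⟨count.toNat, (Int.toNat_of_nonneg hc).symm⟩
    subst hn
    rw [PySem.Int.floordiv_eq_ediv_of_pos (a := price * max (n:Int) 0 * (max (n:Int) 0 + 1)) (by norm_num),
        pv_loop_sum price 0 0 n]
    simp only [zero_add, max_eq_left (by positivity : (0:Int) ≤ (n:Int))]
    omega
  · rw [PySem.List.pyRange_one_eq_nil (by omega), max_eq_right (by omega : count ≤ 0),
        PySem.Int.floordiv_eq_ediv_of_pos (by norm_num)]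
    simp only [List.foldl_nil]
    omega

-- ===== VERDICT (by name: the statement is the Claim_ definition above) =====
theorem solution_spec : Claim_equal_solution := by
  intro price money count _
  exact pv_main price money count
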